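-- pv_equiv track=rewrite | github.com/hwz18896809165/FilteringSensitiveWords | sensitive_word_filtration_project.py | replace_sensitive_words
-- ===== SOURCE A (Python) =====
-- def replace_sensitive_words(key_word,sensitive_words,start):
--     if sensitive_words==[]:
--         return key_word
--     new_key_word = key_word.replace(sensitive_words[start], '*' * len(sensitive_words[start]))
--     if(start+1 == len(sensitive_words)):
--         return new_key_word
--     else:
--         new_key_word = replace_sensitive_words(new_key_word, sensitive_words, start + 1)
--         return new_key_word
-- ===== SOURCE B (Python) =====
-- def replace_sensitive_words(key_word, sensitive_words, start):
--     if sensitive_words == []: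
--         return key_word
--     # first word via explicit indexing (negative indices wrap; out-of-range raises, as in A)
--     w = sensitive_words[start]
--     key_word = key_word.replace(w, '*' * len(w))
--     for i in range(start + 1, len(sensitive_words)):
--         w = sensitive_words[i]
--         key_word = key_word.replace(w, '*' * len(w))
--     return key_word
-- ===== Notes on version B (the rewrite author's own statement) =====
-- stated objective: idiomatic
-- what changed: Replaced A's tail recursion (one call per remaining word, re-checking start+1==len each level) by a single flat for-loop over the remaining indices after an explicit first indexed replace.
import Mathlib
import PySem

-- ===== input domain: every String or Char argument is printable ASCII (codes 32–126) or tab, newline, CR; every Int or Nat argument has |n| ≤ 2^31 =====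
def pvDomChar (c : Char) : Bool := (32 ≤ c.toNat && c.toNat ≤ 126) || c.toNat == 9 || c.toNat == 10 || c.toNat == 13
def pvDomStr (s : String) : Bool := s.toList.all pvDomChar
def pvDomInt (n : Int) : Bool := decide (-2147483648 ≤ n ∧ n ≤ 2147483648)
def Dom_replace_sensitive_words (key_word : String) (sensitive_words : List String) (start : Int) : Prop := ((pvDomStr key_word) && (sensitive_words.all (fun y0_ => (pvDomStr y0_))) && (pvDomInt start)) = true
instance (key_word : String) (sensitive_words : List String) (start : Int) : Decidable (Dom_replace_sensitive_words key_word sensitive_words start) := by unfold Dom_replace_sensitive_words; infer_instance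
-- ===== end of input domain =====

-- B rewrites A's tail recursion as a flat iterative loop over the remaining indices (idiomatic; same cost).

-- '*' * len(w)  (the asterisk mask of a word; used literally by both Pythons)
def pvMask (w : String) : String := String.ofList (List.replicate w.toList.length '*')

-- ===== PORT A =====
def replace_sensitive_words (key_word : String) (sensitive_words : List String) (start : Int) : String :=
  if sensitive_words = [] then key_word
  else
    match heq : PySem.List.pyGet? sensitive_words start with
    | none => key_word   -- Python raises IndexError here; excluded by Pre_
    | some w =>
      let new_key_word := PySem.Str.replace key_word w (pvMask w)
      if start + 1 = (sensitive_words.length : Int) then new_key_word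
      else replace_sensitive_words new_key_word sensitive_words (start + 1)
termination_by ((sensitive_words.length : Int) - start).toNat
decreasing_by
  have hr : PySem.Raise.InRange sensitive_words.length start := by
    by_contra hc
    rw [← PySem.List.pyGet?_eq_none_iff] at hc
    simp_all
  unfold PySem.Raise.InRange at hr
  omega

-- ===== PORT B =====
-- one loop step: key_word = key_word.replace(sensitive_words[i], '*'*len(sensitive_words[i]))
def pvStep (sensitive_words : List String) (acc : String) (i : Int) : String :=
  match PySem.List.pyGet? sensitive_words i with
  | none => acc            -- unreachable under Pre_ (every i in the range is a valid index)
  | some w => PySem.Str.replace acc w (pvMask w)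

def replace_sensitive_words_alt (key_word : String) (sensitive_words : List String) (start : Int) : String :=
  if sensitive_words = [] then key_word
  else
    match PySem.List.pyGet? sensitive_words start with
    | none => key_word     -- Python raises IndexError here; excluded by Pre_
    | some w =>
      (PySem.List.pyRange (start + 1) (sensitive_words.length : Int) 1).foldl
        (pvStep sensitive_words) (PySem.Str.replace key_word w (pvMask w))

-- ===== PRECONDITION & SPEC =====
-- Pre_ excludes exactly the inputs where Python A raises IndexError:
-- a non-empty list with start outside [-len, len).
def Pre_replace_sensitive_words (key_word : String) (sensitive_words : List String) (start : Int) : Prop :=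
  sensitive_words = [] ∨ (-(sensitive_words.length : Int) ≤ start ∧ start < (sensitive_words.length : Int))
instance (key_word : String) (sensitive_words : List String) (start : Int) : Decidable (Pre_replace_sensitive_words key_word sensitive_words start) := by unfold Pre_replace_sensitive_words; infer_instance
def pvWitness_replace_sensitive_words : String × List String × Int := ("bad word", ["bad"], 0)

def Spec_replace_sensitive_words (key_word : String) (sensitive_words : List String) (start : Int) (out : String) : Prop := out = replace_sensitive_words_alt key_word sensitive_words start
instance (key_word : String) (sensitive_words : List String) (start : Int) (out : String) : Decidable (Spec_replace_sensitive_words key_word sensitive_words start out) := by unfold Spec_replace_sensitive_words; infer_instance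

-- ===== CLAIM (what is proved, stated in full; the proofs are below) =====
def Claim_equal_replace_sensitive_words : Prop := ∀ (key_word : String) (sensitive_words : List String) (start : Int), Dom_replace_sensitive_words key_word sensitive_words start → Pre_replace_sensitive_words key_word sensitive_words start → Spec_replace_sensitive_words key_word sensitive_words start (replace_sensitive_words key_word sensitive_words start)

-- ===== LEMMAS AND PROOFS =====

-- A's recursion, characterised as the fold of pvStep over the index range [start, len)
theorem A_eq_fold (n : Nat) : ∀ (key_word : String) (sensitive_words : List String) (start : Int),
    sensitive_words ≠ [] →
    -(sensitive_words.length : Int) ≤ start → start < (sensitive_words.length : Int) →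
    ((sensitive_words.length : Int) - start).toNat = n →
    replace_sensitive_words key_word sensitive_words start =
      (PySem.List.pyRange start (sensitive_words.length : Int) 1).foldl
        (pvStep sensitive_words) key_word := by
  induction n with
  | zero =>
    intro kw ws start _ _ h2 hn
    omega
  | succ m ih =>
    intro kw ws start hne h1 h2 hn
    have hr : PySem.Raise.InRange ws.length start := by
      unfold PySem.Raise.InRange; omega
    obtain ⟨w, hw⟩ : ∃ w, PySem.List.pyGet? ws start = some w := by
      rcases hh : PySem.List.pyGet? ws start with _ | w
      · rw [PySem.List.pyGet?_eq_none_iff] at hh; exact absurd hr hh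
      · exact ⟨w, rfl⟩
    rw [PySem.List.pyRange_one_cons h2, List.foldl_cons]
    have hstep : pvStep ws kw start = PySem.Str.replace kw w (pvMask w) := by
      unfold pvStep; rw [hw]
    rw [hstep, replace_sensitive_words, if_neg hne]
    split
    next heq => rw [hw] at heq; cases heq
    next w' heq =>
      rw [hw] at heq; injection heq with hww; subst hww
      by_cases hlast : start + 1 = (ws.length : Int)
      · rw [if_pos hlast, PySem.List.pyRange_one_eq_nil (le_of_eq hlast.symm), List.foldl_nil]
      · rw [if_neg hlast]
        exact ih _ ws (start + 1) hne (by omega) (by omega) (by omega)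

-- B is the same fold (its first replace is pvStep at index start)
theorem B_eq_fold : ∀ (key_word : String) (sensitive_words : List String) (start : Int),
    sensitive_words ≠ [] →
    -(sensitive_words.length : Int) ≤ start → start < (sensitive_words.length : Int) →
    replace_sensitive_words_alt key_word sensitive_words start =
      (PySem.List.pyRange start (sensitive_words.length : Int) 1).foldl
        (pvStep sensitive_words) key_word := by
  intro kw ws start hne h1 h2
  have hr : PySem.Raise.InRange ws.length start := by
    unfold PySem.Raise.InRange; omega
  obtain ⟨w, hw⟩ : ∃ w, PySem.List.pyGet? ws start = some w := by
    rcases hh : PySem.List.pyGet? ws start with _ | w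
    · rw [PySem.List.pyGet?_eq_none_iff] at hh; exact absurd hr hh
    · exact ⟨w, rfl⟩
  rw [PySem.List.pyRange_one_cons h2, List.foldl_cons]
  have hstep : pvStep ws kw start = PySem.Str.replace kw w (pvMask w) := by
    unfold pvStep; rw [hw]
  rw [hstep, replace_sensitive_words_alt, if_neg hne, hw]

-- ===== VERDICT (by name: the statement is the Claim_ definition above) =====
theorem replace_sensitive_words_spec : Claim_equal_replace_sensitive_words := by
  intro kw ws start _ hpre
  unfold Spec_replace_sensitive_words
  rcases hpre with hnil | ⟨h1, h2⟩
  · subst hnil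
    rw [replace_sensitive_words, replace_sensitive_words_alt]
    simp
  · have hne : ws ≠ [] := by
      intro h; subst h; simp at h1 h2; omega
    rw [A_eq_fold (((ws.length : Int) - start).toNat) kw ws start hne h1 h2 rfl,
        B_eq_fold kw ws start hne h1 h2]
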